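-- pv_equiv track=rewrite | github.com/Raid-Hub/raidhub-discord | src/commands/subscription_helpers.py | _rule_filter_state
-- ===== SOURCE A (Python) =====
-- from typing import Any
--
-- def _rule_filter_state(items: list[Any], key: str) -> str:
--     values = [item.get(key) for item in items if isinstance(item, dict) and key in item]
--     bool_values = [bool(v) for v in values if isinstance(v, bool)]
--     if not bool_values:
--         return "unset"
--     uniq = set(bool_values)
--     if len(uniq) > 1:
--         return "mixed"
--     return "yes" if True in uniq else "no"
-- ===== SOURCE B (Python) =====
-- def _rule_filter_state(items, key):
--     # Bitmask lattice: bit 0 = a False was seen, bit 1 = a True was seen.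
--     # OR the per-item codes together, short-circuiting as soon as the mask
--     # saturates at 3 ("mixed"); otherwise index a lookup table by the mask.
--     mask = 0
--     for item in items:
--         if isinstance(item, dict) and key in item:
--             v = item.get(key)
--             if isinstance(v, bool):
--                 mask |= 2 if v else 1
--                 if mask == 3:
--                     return "mixed"
--     return ("unset", "no", "yes")[mask]
-- ===== Notes on version B (the rewrite author's own statement) =====
-- stated objective: alternative
-- what changed: B folds each boolean into a 2-bit lattice mask with bitwise OR, short-circuits to 'mixed' the moment the mask saturates at 3, and otherwise answers by indexing a lookup table with the mask, instead of A's build-list / filter-to-bools / dedup-into-set / inspect-set-size pipeline.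
import Mathlib
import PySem

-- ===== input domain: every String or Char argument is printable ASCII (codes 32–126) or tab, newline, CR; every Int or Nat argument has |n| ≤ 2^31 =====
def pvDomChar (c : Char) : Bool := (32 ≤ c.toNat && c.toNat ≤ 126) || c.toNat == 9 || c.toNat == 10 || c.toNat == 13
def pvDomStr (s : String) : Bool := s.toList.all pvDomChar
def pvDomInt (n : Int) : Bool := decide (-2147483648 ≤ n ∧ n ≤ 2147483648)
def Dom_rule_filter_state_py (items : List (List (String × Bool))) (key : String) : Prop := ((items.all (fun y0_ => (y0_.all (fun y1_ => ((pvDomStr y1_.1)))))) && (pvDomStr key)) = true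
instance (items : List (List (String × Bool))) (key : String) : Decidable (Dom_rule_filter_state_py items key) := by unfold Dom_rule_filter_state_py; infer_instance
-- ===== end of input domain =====

-- B replaces A's list/filter/set pipeline by a bitwise-OR fold into a 2-bit mask with an early
-- exit on saturation and a table lookup at the end (objective: alternative decomposition).


-- ===== PORT A =====
-- values = [item.get(key) for item in items if isinstance(item, dict) and key in item]
-- bool_values = [bool(v) for v in values if isinstance(v, bool)]   (each dict is str→bool, so the
-- isinstance filter keeps exactly the present values and bool(v) = v)
def rule_filter_state_py (items : List (List (String × Bool))) (key : String) : String :=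
  let values : List (Option Bool) :=
    items.foldl (fun acc item =>
      if PySem.Dict.contains ⟨item⟩ key then acc ++ [PySem.Dict.get? ⟨item⟩ key] else acc) []
  let bool_values : List Bool :=
    values.foldl (fun acc v => match v with | some b => acc ++ [b] | none => acc) []
  if bool_values.isEmpty then "unset"
  else
    let uniq := PySem.Set.ofList bool_values
    if 1 < PySem.Set.len uniq then "mixed"
    else if PySem.Set.contains uniq true then "yes" else "no"

-- ===== PORT B =====
-- the for-loop with its early `return "mixed"` becomes a recursive helper threading the mask
def pvAltLoop (key : String) : List (List (String × Bool)) → Nat → String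
  | [], mask => ["unset", "no", "yes"].getD mask ""   -- ("unset","no","yes")[mask]; mask ≤ 2 here
  | item :: rest, mask =>
    match PySem.Dict.get? ⟨item⟩ key with
    | some v =>
      let mask' := mask ||| (if v then 2 else 1)
      if mask' == 3 then "mixed" else pvAltLoop key rest mask'
    | none => pvAltLoop key rest mask

def rule_filter_state_py_alt (items : List (List (String × Bool))) (key : String) : String :=
  pvAltLoop key items 0

-- ===== PRECONDITION & SPEC =====
def Spec_rule_filter_state_py (items : List (List (String × Bool))) (key : String) (out : String) : Prop := out = rule_filter_state_py_alt items key
instance (items : List (List (String × Bool))) (key : String) (out : String) : Decidable (Spec_rule_filter_state_py items key out) := by unfold Spec_rule_filter_state_py; infer_instance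

-- ===== CLAIM (what is proved, stated in full; the proofs are below) =====
def Claim_equal_rule_filter_state_py : Prop := ∀ (items : List (List (String × Bool))) (key : String), Dom_rule_filter_state_py items key → Spec_rule_filter_state_py items key (rule_filter_state_py items key)

-- ===== LEMMAS AND PROOFS =====

-- the booleans present under `key`, in order
def pvVals (items : List (List (String × Bool))) (key : String) : List Bool :=
  items.filterMap (fun item => PySem.Dict.get? ⟨item⟩ key)

theorem pvVals_cons (item : List (String × Bool)) (items : List (List (String × Bool))) (key : String) :
    pvVals (item :: items) key =
      (match PySem.Dict.get? ⟨item⟩ key with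
        | some v => v :: pvVals items key
        | none => pvVals items key) := by
  simp [pvVals, List.filterMap_cons]
  cases PySem.Dict.get? ⟨item⟩ key <;> simp

-- A's first fold collects (vals).map some
theorem a_values_eq (items : List (List (String × Bool))) (key : String) (acc : List (Option Bool)) :
    items.foldl (fun acc item =>
      if PySem.Dict.contains ⟨item⟩ key then acc ++ [PySem.Dict.get? ⟨item⟩ key] else acc) acc
      = acc ++ (pvVals items key).map some := by
  induction items generalizing acc with
  | nil => simp [pvVals]
  | cons item rest ih =>
    simp only [List.foldl_cons, ih, pvVals_cons]
    have hc : PySem.Dict.contains ⟨item⟩ key = (PySem.Dict.get? ⟨item⟩ key).isSome := by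
      simp [PySem.Dict.contains, PySem.Dict.get?]
      induction item with
      | nil => simp
      | cons p t iht => by_cases h : p.1 == key <;> simp [h, iht]
    rw [hc]
    cases PySem.Dict.get? ⟨item⟩ key <;> simp

-- A's second fold unwraps them back
theorem a_bools_eq (vs : List Bool) (acc : List Bool) :
    (vs.map some).foldl (fun acc v => match v with | some b => acc ++ [b] | none => acc) acc
      = acc ++ vs := by
  induction vs generalizing acc with
  | nil => simp
  | cons v t ih => simp [ih]

-- a nodup list of booleans is one of five lists
theorem bool_nodup_cases (s : List Bool) (h : s.Nodup) :
    s = [] ∨ s = [true] ∨ s = [false] ∨ s = [true, false] ∨ s = [false, true] := by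
  match s with
  | [] => simp
  | [a] => cases a <;> simp
  | a :: b :: t =>
    have hab : a ≠ b := by simp [List.nodup_cons] at h; exact h.1.1
    have ht : t = [] := by
      cases t with
      | nil => rfl
      | cons c u =>
        exfalso
        simp [List.nodup_cons] at h
        cases a <;> cases b <;> cases c <;> simp_all
    subst ht
    cases a <;> cases b <;> simp_all

-- classification of A's tail from the two membership facts
theorem classify_eq (vs : List Bool) :
    (if vs.isEmpty then "unset"
     else
       let uniq := PySem.Set.ofList vs
       if 1 < PySem.Set.len uniq then "mixed"
       else if PySem.Set.contains uniq true then "yes" else "no")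
      = (if (vs.contains true) && (vs.contains false) then "mixed"
         else if vs.contains true then "yes"
         else if vs.contains false then "no"
         else "unset") := by
  have hmem : ∀ b : Bool, (b ∈ PySem.Set.ofList vs) ↔ b ∈ vs := by
    intro b; exact PySem.Set.mem_ofList (xs := vs) (y := b)
  have hnd : (PySem.Set.ofList vs).Nodup := PySem.Set.nodup_ofList vs
  rcases bool_nodup_cases _ hnd with h | h | h | h | h <;>
  · have ht := (hmem true).symm
    have hf := (hmem false).symm
    rw [h] at ht hf
    simp only [PySem.Set.len, PySem.Set.contains, h]
    cases vs with
    | nil => simp_all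
    | cons v t => simp_all [List.contains_eq_mem]

-- B's mask loop, characterised: with mask = 2·st + sf (not both set), the loop answers the
-- same four-way classification on (st ∨ true present, sf ∨ false present)
theorem alt_loop_eq (items : List (List (String × Bool))) (key : String) (st sf : Bool)
    (h : ¬(st = true ∧ sf = true)) :
    pvAltLoop key items ((if st then 2 else 0) + (if sf then 1 else 0))
      = (if (st || (pvVals items key).contains true) && (sf || (pvVals items key).contains false) then "mixed"
         else if st || (pvVals items key).contains true then "yes"
         else if sf || (pvVals items key).contains false then "no"
         else "unset") := by
  induction items generalizing st sf with
  | nil => cases st <;> cases sf <;> simp_all [pvAltLoop, pvVals]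
  | cons item rest ih =>
    simp only [pvAltLoop, pvVals_cons]
    cases hv : PySem.Dict.get? ⟨item⟩ key with
    | none => exact ih st sf h
    | some v =>
      cases v with
      | true =>
        cases sf with
        | true =>
          cases st with
          | true => exact absurd ⟨rfl, rfl⟩ h
          | false => simp
        | false =>
          have := ih true false (by simp)
          cases st <;> simpa using this
      | false =>
        cases st with
        | true =>
          cases sf with
          | true => exact absurd ⟨rfl, rfl⟩ h
          | false => simp
        | false =>
          have := ih false true (by simp)
          cases sf <;> simpa using this

-- ===== VERDICT (by name: the statement is the Claim_ definition above) =====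
theorem rule_filter_state_py_spec : Claim_equal_rule_filter_state_py := by
  intro items key _
  unfold Spec_rule_filter_state_py rule_filter_state_py rule_filter_state_py_alt
  simp only [a_values_eq, List.nil_append, a_bools_eq]
  rw [classify_eq]
  have := alt_loop_eq items key false false (by simp)
  simpa using this.symm
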